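-- pv_equiv track=rewrite | github.com/openlawteam/gate | gate/fixer.py | fixability_summary
-- ===== SOURCE A (Python) =====
-- def fixability_summary(findings: list[dict]) -> str:
--     """Return a one-line human-readable count, e.g. ``5 trivial, 3 scoped, 2 broad, 0 unknown``."""
--     buckets = {"trivial": 0, "scoped": 0, "broad": 0, "unknown": 0}
--     for f in findings:
--         cls = f.get("fixability") or "unknown"
--         if cls not in buckets:
--             cls = "unknown"
--         buckets[cls] += 1
--     parts = [f"{buckets[k]} {k}" for k in ("trivial", "scoped", "broad", "unknown")]
--     return ", ".join(parts)
-- ===== SOURCE B (Python) =====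
-- def fixability_summary(findings: list[dict]) -> str:
--     """Return a one-line human-readable count, e.g. ``5 trivial, 3 scoped, 2 broad, 0 unknown``."""
--     def normalize(f):
--         cls = f.get("fixability") or "unknown"
--         return cls if cls in ("trivial", "scoped", "broad") else "unknown"
--     return ", ".join(
--         f"{sum(1 for f in findings if normalize(f) == k)} {k}"
--         for k in ("trivial", "scoped", "broad", "unknown")
--     )
-- ===== Notes on version B (the rewrite author's own statement) =====
-- stated objective: alternative
-- what changed: Replaces the single pass that mutates a counter dict with a per-finding normalizer plus four independent counting scans (one per bucket), so no mutable dict state is kept.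
import Mathlib
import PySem

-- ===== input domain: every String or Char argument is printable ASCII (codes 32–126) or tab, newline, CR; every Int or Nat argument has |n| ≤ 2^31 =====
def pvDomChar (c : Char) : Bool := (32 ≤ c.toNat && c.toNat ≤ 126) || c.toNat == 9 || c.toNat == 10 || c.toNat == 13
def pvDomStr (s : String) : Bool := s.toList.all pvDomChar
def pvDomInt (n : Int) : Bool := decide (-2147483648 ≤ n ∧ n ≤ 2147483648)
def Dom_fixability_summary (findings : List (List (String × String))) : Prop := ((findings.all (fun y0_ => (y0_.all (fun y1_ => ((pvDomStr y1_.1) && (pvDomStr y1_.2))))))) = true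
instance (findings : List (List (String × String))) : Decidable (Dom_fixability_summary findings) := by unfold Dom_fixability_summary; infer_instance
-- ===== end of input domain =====

-- B replaces A's single mutating-counter-dict pass by a normalizer and four independent counting scans (alternative decomposition, same cost).

-- ===== PORT A =====
def fixability_summary (findings : List (List (String × String))) : String :=
  let buckets0 : PySem.Dict String Int :=
    (((PySem.Dict.empty.insert "trivial" 0).insert "scoped" 0).insert "broad" 0).insert "unknown" 0
  let buckets := findings.foldl (fun b f =>
    let cls := match (PySem.Dict.mk f).get? "fixability" with
      | some v => if v = "" then "unknown" else v
      | none => "unknown"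
    let cls := if b.contains cls then cls else "unknown"
    b.insert cls (b.getD cls 0 + 1)) buckets0
  let parts := ["trivial", "scoped", "broad", "unknown"].map
    (fun k => PySem.Int.toStr (buckets.getD k 0) ++ " " ++ k)
  PySem.Str.join ", " parts

-- ===== PORT B =====
def pvNormalize (f : List (String × String)) : String :=
  let cls := match (PySem.Dict.mk f).get? "fixability" with
    | some v => if v = "" then "unknown" else v
    | none => "unknown"
  if cls = "trivial" ∨ cls = "scoped" ∨ cls = "broad" then cls else "unknown"

def fixability_summary_alt (findings : List (List (String × String))) : String :=
  PySem.Str.join ", " (["trivial", "scoped", "broad", "unknown"].map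
    (fun k => PySem.Int.toStr (((findings.filter (fun f => pvNormalize f == k)).length : Int)) ++ " " ++ k))

-- ===== PRECONDITION & SPEC =====
def Spec_fixability_summary (findings : List (List (String × String))) (out : String) : Prop := out = fixability_summary_alt findings
instance (findings : List (List (String × String))) (out : String) : Decidable (Spec_fixability_summary findings out) := by unfold Spec_fixability_summary; infer_instance

-- ===== CLAIM (what is proved, stated in full; the proofs are below) =====
def Claim_equal_fixability_summary : Prop := ∀ (findings : List (List (String × String))), Dom_fixability_summary findings → Spec_fixability_summary findings (fixability_summary findings)

-- ===== LEMMAS AND PROOFS =====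

-- the loop invariant: starting from any dict whose keys are exactly the four buckets,
-- A's fold adds, at each key, the number of findings normalizing to it
theorem pv_fold_getD (fs : List (List (String × String))) (b : PySem.Dict String Int)
    (hk : b.keys = ["trivial", "scoped", "broad", "unknown"]) (k : String) :
    (fs.foldl (fun b f =>
      let cls := match (PySem.Dict.mk f).get? "fixability" with
        | some v => if v = "" then "unknown" else v
        | none => "unknown"
      let cls := if b.contains cls then cls else "unknown"
      b.insert cls (b.getD cls 0 + 1)) b).getD k 0
    = b.getD k 0 + ((fs.filter (fun f => pvNormalize f == k)).length : Int) := by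
  induction fs generalizing b with
  | nil => simp
  | cons f fs ih =>
    simp only [List.foldl_cons, List.filter_cons]
    have hcontains : ∀ c, b.contains c = decide (c ∈ ["trivial", "scoped", "broad", "unknown"]) := by
      intro c
      rw [PySem.Dict.contains_eq_decide_mem_keys, hk]
    set cls0 : String := (match (PySem.Dict.mk f).get? "fixability" with
        | some v => if v = "" then "unknown" else v
        | none => "unknown") with hcls0
    have hnorm : (if b.contains cls0 then cls0 else "unknown") = pvNormalize f := by
      rw [hcontains]
      simp only [pvNormalize, ← hcls0]
      by_cases h1 : cls0 = "trivial" <;> by_cases h2 : cls0 = "scoped" <;>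
        by_cases h3 : cls0 = "broad" <;> simp_all
    have hc3 : b.contains (if b.contains cls0 then cls0 else "unknown") = true := by
      rw [hnorm, hcontains]
      simp only [pvNormalize, ← hcls0]
      split
      · rename_i h; rcases h with h | h | h <;> simp [h]
      · simp
    have hkeep : (b.insert (if b.contains cls0 then cls0 else "unknown")
        (b.getD (if b.contains cls0 then cls0 else "unknown") 0 + 1)).keys
        = ["trivial", "scoped", "broad", "unknown"] := by
      rw [PySem.Dict.keys_insert_of_contains _ _ hc3, hk]
    rw [ih _ hkeep]
    rw [PySem.Dict.getD_insert, hnorm]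
    by_cases hek : pvNormalize f = k
    · simp [hek]; ring
    · simp [hek, Ne.symm hek]

-- ===== VERDICT (by name: the statement is the Claim_ definition above) =====
theorem fixability_summary_spec : Claim_equal_fixability_summary := by
  intro findings _
  show fixability_summary findings = fixability_summary_alt findings
  unfold fixability_summary fixability_summary_alt
  simp only []
  congr 1
  apply List.map_congr_left
  intro k hk
  congr 1
  congr 1
  rw [pv_fold_getD _ _ (by decide) k]
  simp [PySem.Dict.getD_insert]
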